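-- pv_equiv track=rewrite | github.com/Fondamenti18/fondamenti-di-programmazione | students/1798179/homework01/program03.py | coppie_reverse
-- ===== SOURCE A (Python) =====
-- def disordinamento(s):
--     a=len(s)-1
--     dis=[]
--     s_dis=""
--     while a>=0:
--         if "a"<=s[a]<="z":
--             dis=[s[a]]+dis
--             if s[a] in dis[1: ]:
--                 dis.remove(s[a])
--         a=a-1
--     return s_dis.join(dis)
--
-- def ordinamento(s):
--     s_ord=""
--     a=disordinamento(s)
--     return s_ord.join(sorted(a))
--
-- def coppie_reverse(s1):
--     d={}
--     i=0
--     s=disordinamento(s1)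
--     ss=ordinamento(s1)
--     while i<len(s):
--         d[s[i]]=ss[i]
--         i=i+1
--     return d
-- ===== SOURCE B (Python) =====
-- def coppie_reverse(s1):
--     # one forward pass: last index of every lowercase letter
--     seen = {}
--     for i, c in enumerate(s1):
--         if "a" <= c <= "z":
--             seen[c] = i
--     # distinct letters in ascending order of last occurrence, and alphabetically
--     order = sorted(seen, key=seen.get)
--     target = sorted(seen)
--     return dict(zip(order, target))
-- ===== Notes on version B (the rewrite author's own statement) =====
-- stated objective: faster
-- what changed: Replaces A's backward O(n^2) list-membership dedup plus per-index dict-building loop with one forward pass recording each lowercase letter's last index in a dict, then two sorts (by last index and alphabetically) zipped into the result.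
import Mathlib
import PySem

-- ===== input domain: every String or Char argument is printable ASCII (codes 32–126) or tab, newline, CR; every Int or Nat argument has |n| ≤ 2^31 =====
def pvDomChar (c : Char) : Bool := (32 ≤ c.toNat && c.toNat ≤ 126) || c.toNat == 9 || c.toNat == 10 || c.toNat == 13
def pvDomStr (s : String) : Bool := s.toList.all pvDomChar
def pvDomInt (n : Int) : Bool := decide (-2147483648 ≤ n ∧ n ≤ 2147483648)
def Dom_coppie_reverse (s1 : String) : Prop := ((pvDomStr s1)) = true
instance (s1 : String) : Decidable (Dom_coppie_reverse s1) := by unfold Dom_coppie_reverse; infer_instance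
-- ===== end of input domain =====

-- B replaces A's backward quadratic membership-dedup and per-index dict loop by one forward
-- pass recording each lowercase letter's last index plus two sorts zipped together (objective: faster).

-- ===== PORT A =====
-- the 'while a>=0' loop of disordinamento, fuel = a+1 (a = k is the current index)
def pvDisLoop (cs : List Char) : Nat → List Char → List Char
  | 0, dis => dis
  | k + 1, dis =>
      let c := PySem.List.pyGetD cs (k : Int) ' '
      pvDisLoop cs k
        (if 'a' ≤ c ∧ c ≤ 'z' then
          -- dis=[s[a]]+dis; if s[a] in dis[1:]: dis.remove(s[a])  (remove? never fails: c is the head)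
          let dis1 := [c] ++ dis
          if c ∈ PySem.List.slice dis1 (some 1) none then (PySem.List.remove? dis1 c).getD dis1
          else dis1
        else dis)

-- disordinamento(s) as its character list ("".join of the single-char strings)
def pvDisordinamento (cs : List Char) : List Char := pvDisLoop cs cs.length []

def coppie_reverse (s1 : String) : List (String × String) :=
  let s := pvDisordinamento s1.toList
  -- ordinamento(s1) = "".join(sorted(disordinamento(s1)))
  let ss := PySem.List.sorted (pvDisordinamento s1.toList) (fun c => c) false
  -- while i<len(s): d[s[i]]=ss[i]  (dict keys/values are the 1-char strings)
  let d := (PySem.List.pyRange 0 (s.length : Int) 1).foldl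
    (fun (d : PySem.Dict String String) i =>
      d.insert (String.ofList [PySem.List.pyGetD s i ' ']) (String.ofList [PySem.List.pyGetD ss i ' ']))
    PySem.Dict.empty
  d.items

-- ===== PORT B =====
def coppie_reverse_alt (s1 : String) : List (String × String) :=
  -- seen[c] = i for every lowercase c (last index wins)
  let seen : PySem.Dict Char Int :=
    (PySem.List.enumerate s1.toList 0).foldl
      (fun d p => if 'a' ≤ p.2 ∧ p.2 ≤ 'z' then d.insert p.2 p.1 else d) PySem.Dict.empty
  -- sorted(seen, key=seen.get): every sorted element is a key of seen, so getD is exact here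
  let order := PySem.List.sorted seen.keys (fun c => seen.getD c 0) false
  let target := PySem.List.sorted seen.keys (fun c => c) false
  -- dict(zip(order, target))
  let d := (order.zip target).foldl
    (fun (d : PySem.Dict String String) p => d.insert (String.ofList [p.1]) (String.ofList [p.2]))
    PySem.Dict.empty
  d.items

-- ===== PRECONDITION & SPEC =====
def Spec_coppie_reverse (s1 : String) (out : List (String × String)) : Prop := out = coppie_reverse_alt s1
instance (s1 : String) (out : List (String × String)) : Decidable (Spec_coppie_reverse s1 out) := by unfold Spec_coppie_reverse; infer_instance

-- ===== CLAIM (what is proved, stated in full; the proofs are below) =====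
def Claim_equal_coppie_reverse : Prop := ∀ (s1 : String), Dom_coppie_reverse s1 → Spec_coppie_reverse s1 (coppie_reverse s1)

-- ===== LEMMAS AND PROOFS =====

-- the step A's loop body performs on the accumulator, simplified
def pvStep (c : Char) (dis : List Char) : List Char :=
  if 'a' ≤ c ∧ c ≤ 'z' then (if c ∈ dis then dis else c :: dis) else dis

theorem pvStep_body (c : Char) (dis : List Char) :
    (if 'a' ≤ c ∧ c ≤ 'z' then
      let dis1 := [c] ++ dis
      if c ∈ PySem.List.slice dis1 (some 1) none then (PySem.List.remove? dis1 c).getD dis1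
      else dis1
    else dis) = pvStep c dis := by
  simp only [pvStep, PySem.List.slice_from_one, List.singleton_append, List.tail_cons]
  by_cases h : 'a' ≤ c ∧ c ≤ 'z'
  · simp only [h]
    by_cases hm : c ∈ dis
    · simp [hm, PySem.List.remove?, List.idxOf?_cons]
    · simp [hm]
  · simp [h]

theorem pvDisLoop_eq_foldr (cs : List Char) (k : Nat) (hk : k ≤ cs.length) (dis : List Char) :
    pvDisLoop cs k dis = (cs.take k).foldr pvStep dis := by
  induction k generalizing dis with
  | zero => simp [pvDisLoop]
  | succ k ih =>
    have hk' : k < cs.length := by omega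
    have hget : PySem.List.pyGetD cs (k : Int) ' ' = cs[k] := by
      simp [PySem.List.pyGetD_natCast, List.getD_eq_getElem?_getD, hk']
    rw [pvDisLoop, hget, pvStep_body cs[k] dis, ih (by omega), List.take_add_one, List.foldr_append]
    simp [hk']

theorem pvDis_eq_foldr (cs : List Char) : pvDisordinamento cs = cs.foldr pvStep [] := by
  rw [pvDisordinamento, pvDisLoop_eq_foldr cs cs.length le_rfl [], List.take_length]

theorem mem_foldr_pvStep (cs : List Char) (x : Char) :
    x ∈ cs.foldr pvStep [] ↔ ('a' ≤ x ∧ x ≤ 'z') ∧ x ∈ cs := by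
  induction cs generalizing x with
  | nil => simp
  | cons c t ih =>
    simp only [List.foldr_cons, pvStep]
    by_cases h : 'a' ≤ c ∧ c ≤ 'z'
    · rw [if_pos h]
      by_cases hm : c ∈ t.foldr pvStep []
      · have hc := (ih c).mp hm
        rw [if_pos hm, ih x]; simp only [List.mem_cons]
        constructor
        · rintro ⟨hl, hx⟩; exact ⟨hl, Or.inr hx⟩
        · rintro ⟨hl, rfl | hx⟩; exacts [hc, ⟨hl, hx⟩]
      · rw [if_neg hm]
        simp only [List.mem_cons, ih x]
        constructor
        · rintro (rfl | ⟨hl, hx⟩); exacts [⟨h, Or.inl rfl⟩, ⟨hl, Or.inr hx⟩]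
        · rintro ⟨hl, rfl | hx⟩; exacts [Or.inl rfl, Or.inr ⟨hl, hx⟩]
    · rw [if_neg h, ih x]; simp only [List.mem_cons]
      constructor
      · rintro ⟨hl, hx⟩; exact ⟨hl, Or.inr hx⟩
      · rintro ⟨hl, rfl | hx⟩; exacts [absurd hl h, ⟨hl, hx⟩]

theorem nodup_foldr_pvStep (cs : List Char) : (cs.foldr pvStep []).Nodup := by
  induction cs with
  | nil => simp
  | cons c t ih =>
    simp only [List.foldr_cons, pvStep]
    by_cases h : 'a' ≤ c ∧ c ≤ 'z'
    · by_cases hm : c ∈ t.foldr pvStep []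
      · simpa [h, hm] using ih
      · simp only [h, hm, if_false]
        exact List.Nodup.cons hm ih
    · simpa [h] using ih

-- index (from the front) of the LAST occurrence of c in l (meaningful when c ∈ l)
def pvLast : List Char → Char → Int
  | [], _ => 0
  | _ :: t, c => if c ∈ t then pvLast t c + 1 else 0

theorem pvLast_nonneg (l : List Char) (c : Char) : 0 ≤ pvLast l c := by
  cases l with
  | nil => simp [pvLast]
  | cons x t =>
    simp only [pvLast]
    split
    · have := pvLast_nonneg t c; omega
    · omega

theorem pairwise_pvLast (cs : List Char) :
    (cs.foldr pvStep []).Pairwise (fun a b => pvLast cs a < pvLast cs b) := by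
  induction cs with
  | nil => simp
  | cons c t ih =>
    have hmemt : ∀ a ∈ t.foldr pvStep [], a ∈ t := fun a ha => ((mem_foldr_pvStep t a).mp ha).2
    have hshift : (t.foldr pvStep []).Pairwise (fun a b => pvLast (c :: t) a < pvLast (c :: t) b) := by
      refine ih.imp_of_mem ?_
      intro a b ha hb hab
      simp only [pvLast, hmemt a ha, hmemt b hb, if_true]
      omega
    simp only [List.foldr_cons, pvStep]
    by_cases h : 'a' ≤ c ∧ c ≤ 'z'
    · by_cases hm : c ∈ t.foldr pvStep []
      · simpa [h, hm] using hshift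
      · simp only [h, hm, if_false]
        refine List.Pairwise.cons ?_ hshift
        intro b hb
        have hct : c ∉ t := fun hct => hm ((mem_foldr_pvStep t c).mpr ⟨h, hct⟩)
        simp only [pvLast, hct, hmemt b hb, if_true, if_false]
        have := pvLast_nonneg t b
        omega
    · simpa [h] using hshift

-- B's first loop: get? returns the last index of each lowercase letter
theorem pvSeen_get (t : List Char) (s : Int) (d : PySem.Dict Char Int) (c : Char) :
    ((PySem.List.enumerate t s).foldl
      (fun d p => if 'a' ≤ p.2 ∧ p.2 ≤ 'z' then d.insert p.2 p.1 else d) d).get? c =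
    if 'a' ≤ c ∧ c ≤ 'z' ∧ c ∈ t then some (s + pvLast t c) else d.get? c := by
  induction t generalizing s d with
  | nil => simp
  | cons x t ih =>
    rw [PySem.List.enumerate_cons, List.foldl_cons]
    show ((PySem.List.enumerate t (s + 1)).foldl _
      (if 'a' ≤ x ∧ x ≤ 'z' then d.insert x s else d)).get? c = _
    by_cases hct : ('a' ≤ c ∧ c ≤ 'z') ∧ c ∈ t
    · rw [ih, if_pos ⟨hct.1.1, hct.1.2, hct.2⟩,
        if_pos ⟨hct.1.1, hct.1.2, List.mem_cons_of_mem x hct.2⟩]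
      simp only [pvLast, hct.2, if_true]
      congr 1; omega
    · rw [ih, if_neg (by tauto)]
      by_cases h : 'a' ≤ x ∧ x ≤ 'z'
      · rw [if_pos h]
        by_cases hcx : c = x
        · subst hcx
          rw [PySem.Dict.get?_insert_self, if_pos ⟨h.1, h.2, List.mem_cons_self⟩]
          have hnt : c ∉ t := by tauto
          simp only [pvLast, hnt, if_false]
          congr 1; omega
        · rw [PySem.Dict.get?_insert_of_ne _ _ hcx, if_neg (by
            rintro ⟨h1, h2, h3⟩
            rcases List.mem_cons.mp h3 with rfl | h3
            · exact hcx rfl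
            · exact hct ⟨⟨h1, h2⟩, h3⟩)]
      · rw [if_neg h, if_neg (by
          rintro ⟨h1, h2, h3⟩
          rcases List.mem_cons.mp h3 with rfl | h3
          · exact h ⟨h1, h2⟩
          · exact hct ⟨⟨h1, h2⟩, h3⟩)]

-- B's first loop: the keys are the distinct lowercase letters in first-occurrence order
theorem pvSeen_keys (t : List Char) (s : Int) :
    ((PySem.List.enumerate t s).foldl
      (fun d p => if 'a' ≤ p.2 ∧ p.2 ≤ 'z' then d.insert p.2 p.1 else d) PySem.Dict.empty).keys =
    PySem.Set.ofList (t.filter (fun c => decide ('a' ≤ c ∧ c ≤ 'z'))) := by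
  rw [PySem.List.foldl_ite_eq_foldl_filter (p := fun p : Int × Char => 'a' ≤ p.2 ∧ p.2 ≤ 'z')
      (f := fun (d : PySem.Dict Char Int) p => d.insert p.2 p.1)]
  rw [PySem.Dict.keys_foldl_insert_key _ (fun p : Int × Char => p.2) (fun _ p => p.1)]
  rw [PySem.Dict.keys_empty]
  have : (List.filter (fun x => decide ('a' ≤ x.2 ∧ x.2 ≤ 'z')) (PySem.List.enumerate t s)).map
      (fun p : Int × Char => p.2) = t.filter (fun c => decide ('a' ≤ c ∧ c ≤ 'z')) := by
    rw [show (fun x : Int × Char => decide ('a' ≤ x.2 ∧ x.2 ≤ 'z'))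
        = ((fun c => decide ('a' ≤ c ∧ c ≤ 'z')) ∘ (fun p : Int × Char => p.2)) from rfl,
      ← List.filter_map, PySem.List.map_snd_enumerate]
  rw [this, PySem.Set.ofList_eq_foldl]
  rfl

-- the index loop over two equal-length lists is the fold over their zip
theorem pvFold_range_zip (xs ys : List Char) (h : xs.length = ys.length) (d : PySem.Dict String String) :
    (PySem.List.pyRange 0 (xs.length : Int) 1).foldl
      (fun d i => d.insert (String.ofList [PySem.List.pyGetD xs i ' ']) (String.ofList [PySem.List.pyGetD ys i ' '])) d
    = (xs.zip ys).foldl (fun d p => d.insert (String.ofList [p.1]) (String.ofList [p.2])) d := by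
  induction xs generalizing ys d with
  | nil => simp [PySem.List.pyRange_one_eq_nil]
  | cons x xs ih =>
    cases ys with
    | nil => simp at h
    | cons y ys =>
      have hlen : xs.length = ys.length := by simpa using h
      rw [PySem.List.pyRange_one_cons (by push_cast [List.length_cons]; omega)]
      rw [List.foldl_cons, List.zip_cons_cons, List.foldl_cons]
      rw [PySem.List.pyGetD_zero_cons, PySem.List.pyGetD_zero_cons]
      have hr : PySem.List.pyRange (0 + 1) ((x :: xs).length : Int) 1
          = (PySem.List.pyRange 0 (xs.length : Int) 1).map (fun i => i + 1) := by
        rw [PySem.List.pyRange_one, PySem.List.pyRange_one]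
        simp only [List.length_cons, List.map_map]
        have : (((xs.length + 1 : Nat) : Int) - (0 + 1)).toNat = ((xs.length : Int) - 0).toNat := by omega
        rw [this]
        apply List.map_congr_left
        intro k _; simp; ring
      rw [hr, List.foldl_map, ← ih ys hlen]
      apply PySem.List.foldl_congr_mem
      intro acc i hi
      have hi' := (PySem.List.mem_pyRange_one).mp hi
      have hgx : PySem.List.pyGetD (x :: xs) (i + 1) ' ' = PySem.List.pyGetD xs i ' ' := by
        obtain ⟨k, hk, rfl⟩ : ∃ k : Nat, (k : Int) < xs.length ∧ i = (k : Int) :=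
          ⟨i.toNat, by omega, by omega⟩
        rw [show ((k : Int) + 1) = ((k + 1 : Nat) : Int) by push_cast; ring]
        rw [PySem.List.pyGetD_natCast, PySem.List.pyGetD_natCast]
        simp
      have hgy : PySem.List.pyGetD (y :: ys) (i + 1) ' ' = PySem.List.pyGetD ys i ' ' := by
        obtain ⟨k, hk, rfl⟩ : ∃ k : Nat, (k : Int) < xs.length ∧ i = (k : Int) :=
          ⟨i.toNat, by omega, by omega⟩
        rw [show ((k : Int) + 1) = ((k + 1 : Nat) : Int) by push_cast; ring]
        rw [PySem.List.pyGetD_natCast, PySem.List.pyGetD_natCast]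
        simp
      rw [hgx, hgy]

-- ===== VERDICT (by name: the statement is the Claim_ definition above) =====
theorem coppie_reverse_spec : Claim_equal_coppie_reverse := by
  intro s1 _
  show coppie_reverse s1 = coppie_reverse_alt s1
  rw [coppie_reverse, coppie_reverse_alt]
  set cs := s1.toList with hcs
  set D := cs.foldr pvStep [] with hD
  set seen := (PySem.List.enumerate cs 0).foldl
      (fun d p => if 'a' ≤ p.2 ∧ p.2 ≤ 'z' then d.insert p.2 p.1 else d) PySem.Dict.empty with hseen
  have hdis : pvDisordinamento cs = D := pvDis_eq_foldr cs
  have hkeys : seen.keys = PySem.Set.ofList (cs.filter (fun c => decide ('a' ≤ c ∧ c ≤ 'z'))) :=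
    pvSeen_keys cs 0
  have hmemkeys : ∀ x, x ∈ seen.keys ↔ x ∈ D := by
    intro x
    rw [hkeys, PySem.Set.mem_ofList, List.mem_filter, hD, mem_foldr_pvStep]
    simp [and_comm]
  have hperm : D.Perm seen.keys := by
    rw [List.perm_ext_iff_of_nodup (hD ▸ nodup_foldr_pvStep cs) (hkeys ▸ PySem.Set.nodup_ofList _)]
    intro a; exact (hmemkeys a).symm
  have hkey : ∀ a ∈ D, seen.getD a 0 = pvLast cs a := by
    intro a ha
    have hm := (mem_foldr_pvStep cs a).mp (hD ▸ ha)
    rw [PySem.Dict.getD_eq_get?_getD, pvSeen_get, if_pos ⟨hm.1.1, hm.1.2, hm.2⟩]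
    simp
  have horder : PySem.List.sorted seen.keys (fun c => seen.getD c 0) false = D := by
    apply PySem.List.sorted_eq_of_perm_of_pairwise_lt _ _ _ hperm
    refine (pairwise_pvLast cs).imp_of_mem ?_
    intro a b ha hb hab
    rw [hkey a (hD ▸ ha), hkey b (hD ▸ hb)]
    exact hab
  have htarget : PySem.List.sorted seen.keys (fun c => c) false
      = PySem.List.sorted D (fun c => c) false :=
    PySem.List.sorted_eq_sorted_of_perm _ _ _ (fun a b h => h) hperm.symm
  rw [hdis, horder, htarget,
    pvFold_range_zip D (PySem.List.sorted D (fun c => c) false)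
      (PySem.List.length_sorted D (fun c => c) false).symm]
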